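-- pv_equiv track=rewrite | github.com/asweigart/programmedpatterns | book/visualpatterns.py | formula32
-- ===== SOURCE A (Python) =====
-- def formula32(step):
--     count = 1
--     i = 2
--     while True:
--         if i > step:
--             break
--         count += 3
--         i += 1
--
--         if i > step:
--             break
--         count += 0
--         i += 1
--     return count
-- ===== SOURCE B (Python) =====
-- def formula32(step):
--     return 1 + 3 * max(0, step // 2)
-- ===== Notes on version B (the rewrite author's own statement) =====
-- stated objective: faster
-- what changed: Replaced the O(step) counting loop by the closed form 1 + 3*max(0, step//2).
import Mathlib
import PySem

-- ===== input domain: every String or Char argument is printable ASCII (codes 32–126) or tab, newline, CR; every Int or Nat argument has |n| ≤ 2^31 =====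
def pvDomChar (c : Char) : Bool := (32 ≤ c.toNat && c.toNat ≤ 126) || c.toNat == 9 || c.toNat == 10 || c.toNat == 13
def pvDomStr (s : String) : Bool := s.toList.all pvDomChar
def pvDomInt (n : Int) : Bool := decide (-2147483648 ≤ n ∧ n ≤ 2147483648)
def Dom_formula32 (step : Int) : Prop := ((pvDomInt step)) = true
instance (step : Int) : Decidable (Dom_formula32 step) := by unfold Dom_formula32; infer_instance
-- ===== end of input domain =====

-- B replaces A's O(step) counting loop by the closed form 1 + 3*max(0, step//2) (faster, asymptotic).


-- ===== PORT A =====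
-- the 'while True' loop: state (count, i); terminates because step - i decreases
def formula32Loop (step count i : Int) : Int :=
  if _h1 : i > step then count
  else
    let count := count + 3
    let i := i + 1
    if _h2 : i > step then count
    else formula32Loop step (count + 0) (i + 1)
termination_by (step - i).toNat
decreasing_by simp at _h1 _h2; omega

def formula32 (step : Int) : Int := formula32Loop step 1 2

-- ===== PORT B =====
def formula32_alt (step : Int) : Int := 1 + 3 * max 0 (PySem.Int.floordiv step 2)

-- ===== PRECONDITION & SPEC =====
def Spec_formula32 (step : Int) (out : Int) : Prop := out = formula32_alt step
instance (step : Int) (out : Int) : Decidable (Spec_formula32 step out) := by unfold Spec_formula32; infer_instance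

-- ===== CLAIM (what is proved, stated in full; the proofs are below) =====
def Claim_equal_formula32 : Prop := ∀ (step : Int), Dom_formula32 step → Spec_formula32 step (formula32 step)

-- ===== LEMMAS AND PROOFS =====
-- loop invariant: from state (count, i) the loop returns count + 3 * (number of j in [i, step] with j ≡ i [2])
theorem formula32Loop_eq (step count i : Int) :
    formula32Loop step count i =
      count + 3 * (if i ≤ step then (step - i) / 2 + 1 else 0) := by
  rw [formula32Loop]
  by_cases h1 : i > step
  · rw [dif_pos h1, if_neg (by omega)]; omega
  · rw [dif_neg h1]
    dsimp only
    by_cases h2 : i + 1 > step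
    · rw [dif_pos h2, if_pos (by omega)]; omega
    · rw [dif_neg h2, formula32Loop_eq]
      split_ifs with h3 h4 <;> omega
termination_by (step - i).toNat
decreasing_by omega

theorem formula32_spec : Claim_equal_formula32 := by
  intro step _
  unfold Spec_formula32 formula32 formula32_alt
  rw [formula32Loop_eq]
  rcases lt_trichotomy step 0 with h | h | h
  · rw [show PySem.Int.floordiv step 2 = Int.fdiv step 2 from rfl]
    have : Int.fdiv step 2 < 0 := Int.fdiv_neg_of_neg_of_pos h (by norm_num)
    split_ifs with h2 <;> omega
  · subst h; decide
  · rw [PySem.Int.floordiv_eq_ediv_of_pos (by norm_num)]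
    split_ifs with h2 <;> omega
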